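-- pv_equiv track=rewrite | github.com/hariszaf/microbetag | utils/pathway_complementarity.py | split_pluses
-- ===== SOURCE A (Python) =====
-- def split_pluses(path):
--    """
--    In modules with terms in their definitions like 'K02821+K02822+K03475,
--    this functions splits them so it is easier to check whether all the terms are present
--    """
--    split_path = []
--    for entry in path:
--       if "+" in entry:
--          entries = entry.split("+")
--
--          for i in entries:
--             split_path.append(i)
--       else:
--          split_path.append(entry)
--
--    return split_path
-- ===== SOURCE B (Python) =====
-- def split_pluses(path):
--     if not path:
--         return []
--     return "+".join(path).split("+")
-- ===== Notes on version B (the rewrite author's own statement) =====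
-- stated objective: idiomatic
-- what changed: Replaces the per-entry loop with its membership test and inner append loop by a single '+'.join of the whole list followed by one split('+'), guarded for the empty list.
import Mathlib
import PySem

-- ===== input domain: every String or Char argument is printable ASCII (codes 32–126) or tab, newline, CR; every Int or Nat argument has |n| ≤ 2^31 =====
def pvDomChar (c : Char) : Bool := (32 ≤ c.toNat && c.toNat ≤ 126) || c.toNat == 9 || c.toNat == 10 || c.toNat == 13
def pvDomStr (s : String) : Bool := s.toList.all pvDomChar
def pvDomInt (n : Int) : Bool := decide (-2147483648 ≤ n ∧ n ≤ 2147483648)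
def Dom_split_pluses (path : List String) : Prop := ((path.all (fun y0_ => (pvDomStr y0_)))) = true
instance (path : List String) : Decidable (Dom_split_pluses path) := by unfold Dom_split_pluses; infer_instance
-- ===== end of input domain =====

-- B replaces A's per-entry loop and branch by one '+'.join of the whole list followed by one split('+') (idiomatic, same cost).

-- ===== PORT A =====
-- entry.split("+") with the literal nonempty separator "+": split? always returns some here
def pvSplitPlus (s : String) : List String := (PySem.Str.split? s "+").getD []

def split_pluses (path : List String) : List String :=
  path.foldl
    (fun split_path entry =>
      if PySem.Str.isIn "+" entry then
        -- entries = entry.split("+"); for i in entries: split_path.append(i)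
        (pvSplitPlus entry).foldl (fun sp i => sp ++ [i]) split_path
      else
        split_path ++ [entry])
    []

-- ===== PORT B =====
def split_pluses_alt (path : List String) : List String :=
  if path = [] then []
  else (PySem.Str.split? (PySem.Str.join "+" path) "+").getD []

-- ===== PRECONDITION & SPEC =====
def Spec_split_pluses (path : List String) (out : List String) : Prop := out = split_pluses_alt path
instance (path : List String) (out : List String) : Decidable (Spec_split_pluses path out) := by unfold Spec_split_pluses; infer_instance

-- ===== CLAIM (what is proved, stated in full; the proofs are below) =====
def Claim_equal_split_pluses : Prop := ∀ (path : List String), Dom_split_pluses path → Spec_split_pluses path (split_pluses path)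

-- ===== LEMMAS AND PROOFS =====

-- clean structural recursion computing "split on '+'" as (first piece, remaining pieces)
def pvMS : List Char → List Char × List (List Char)
  | [] => ([], [])
  | c :: r =>
    let pr := pvMS r
    if c = '+' then ([], pr.1 :: pr.2) else (c :: pr.1, pr.2)

theorem go_char (fuel : Nat) : ∀ (l cur : List Char) (acc : List (List Char)),
    l.length ≤ fuel →
    PySem.Chars.splitOn.go ['+'] fuel l cur acc
      = acc.reverse ++ ((cur.reverse ++ (pvMS l).1) :: (pvMS l).2) := by
  induction fuel with
  | zero =>
    intro l cur acc h
    have : l = [] := List.length_eq_zero_iff.mp (Nat.le_zero.mp h)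
    subst this
    simp [PySem.Chars.splitOn.go, pvMS]
  | succ n ih =>
    intro l cur acc h
    cases l with
    | nil => simp [PySem.Chars.splitOn.go, pvMS]
    | cons c rest =>
      have hr : rest.length ≤ n := by simpa using h
      by_cases hc : c = '+'
      · subst hc
        rw [show PySem.Chars.splitOn.go ['+'] (n+1) ('+' :: rest) cur acc
              = PySem.Chars.splitOn.go ['+'] n rest [] (cur.reverse :: acc) by
            simp [PySem.Chars.splitOn.go, List.isPrefixOf]]
        rw [ih rest [] (cur.reverse :: acc) hr]
        simp [pvMS]
      · rw [show PySem.Chars.splitOn.go ['+'] (n+1) (c :: rest) cur acc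
              = PySem.Chars.splitOn.go ['+'] n rest (c :: cur) acc by
            simp [PySem.Chars.splitOn.go, List.isPrefixOf, Ne.symm hc]]
        rw [ih rest (c :: cur) acc hr]
        simp [pvMS, hc]

theorem splitOn_eq_pvMS (s : List Char) :
    PySem.Chars.splitOn s ['+'] = (pvMS s).1 :: (pvMS s).2 := by
  unfold PySem.Chars.splitOn
  rw [go_char (s.length + 1) s [] [] (by omega)]
  simp

theorem pvMS_no_plus (s : List Char) (h : '+' ∉ s) : pvMS s = (s, []) := by
  induction s with
  | nil => simp [pvMS]
  | cons c r ih =>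
    simp only [List.mem_cons, not_or] at h
    simp [pvMS, Ne.symm h.1, ih h.2]

theorem pvMS_append_plus (x y : List Char) :
    pvMS (x ++ '+' :: y) = ((pvMS x).1, (pvMS x).2 ++ (pvMS y).1 :: (pvMS y).2) := by
  induction x with
  | nil => simp [pvMS]
  | cons c r ih =>
    by_cases hc : c = '+'
    · subst hc; simp [pvMS, ih]
    · simp [pvMS, hc, ih]

theorem infix_singleton_iff {a : Char} {l : List Char} : [a] <:+: l ↔ a ∈ l := by
  constructor
  · intro h; exact h.sublist.subset (by simp)
  · intro h
    obtain ⟨u, v, huv⟩ := List.append_of_mem h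
    exact ⟨u, v, by simp [huv]⟩

-- the pieces of one entry, as strings
def pvPieces (s : String) : List String :=
  ((pvMS s.toList).1 :: (pvMS s.toList).2).map String.ofList

theorem pvSplitPlus_eq_pieces (s : String) : pvSplitPlus s = pvPieces s := by
  have ht : ("+" : String).toList = ['+'] := by decide
  simp [pvSplitPlus, PySem.Str.split?, PySem.Chars.split?, ht, splitOn_eq_pvMS, pvPieces]

theorem foldl_append_singleton {α : Type} : ∀ (l acc : List α),
    l.foldl (fun sp i => sp ++ [i]) acc = acc ++ l := by
  intro l
  induction l with
  | nil => simp
  | cons x xs ih => intro acc; simp [List.foldl_cons, ih]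

theorem pvPieces_no_plus (e : String) (h : PySem.Str.isIn "+" e = false) :
    pvPieces e = [e] := by
  have ht : ("+" : String).toList = ['+'] := by decide
  have h' : PySem.Chars.isIn ['+'] e.toList = false := by
    rw [← ht]; simpa using h
  have h2 : '+' ∉ e.toList := fun hm => by
    have h3 := (PySem.Chars.isIn_iff_infix _ _).mpr (infix_singleton_iff.mpr hm)
    simp [h3] at h' 
  simp [pvPieces, pvMS_no_plus _ h2]

theorem step_eq (acc : List String) (e : String) :
    (if PySem.Str.isIn "+" e then (pvSplitPlus e).foldl (fun sp i => sp ++ [i]) acc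
     else acc ++ [e]) = acc ++ pvPieces e := by
  cases he : PySem.Str.isIn "+" e with
  | false => rw [if_neg (by simp), pvPieces_no_plus e he]
  | true => rw [if_pos rfl, foldl_append_singleton, pvSplitPlus_eq_pieces]

theorem split_pluses_aux : ∀ (path : List String) (acc : List String),
    path.foldl
      (fun split_path entry =>
        if PySem.Str.isIn "+" entry then
          (pvSplitPlus entry).foldl (fun sp i => sp ++ [i]) split_path
        else split_path ++ [entry]) acc
      = acc ++ path.flatMap pvPieces := by
  intro path
  induction path with
  | nil => simp
  | cons e rest ih =>
    intro acc
    rw [List.foldl_cons, step_eq, ih, List.flatMap_cons, List.append_assoc]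

theorem split_pluses_flatMap (path : List String) :
    split_pluses path = path.flatMap pvPieces := by
  unfold split_pluses
  simpa using split_pluses_aux path []

theorem pvMS_join : ∀ (rest : List (List Char)) (e : List Char),
    (pvMS (PySem.Chars.join ['+'] (e :: rest))).1 :: (pvMS (PySem.Chars.join ['+'] (e :: rest))).2
      = ((pvMS e).1 :: (pvMS e).2) ++ rest.flatMap (fun r => (pvMS r).1 :: (pvMS r).2) := by
  intro rest
  induction rest with
  | nil => intro e; simp [PySem.Chars.join_singleton]
  | cons r rs ih =>
    intro e
    rw [PySem.Chars.join_cons_cons]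
    have : e ++ ['+'] ++ PySem.Chars.join ['+'] (r :: rs)
        = e ++ '+' :: PySem.Chars.join ['+'] (r :: rs) := by simp
    rw [this, pvMS_append_plus]
    simp [ih r]

theorem split_pluses_alt_flatMap (path : List String) (h : path ≠ []) :
    split_pluses_alt path = path.flatMap pvPieces := by
  obtain ⟨e, rest, rfl⟩ := List.exists_cons_of_ne_nil h
  rw [split_pluses_alt, if_neg (by simp)]
  rw [show (PySem.Str.split? (PySem.Str.join "+" (e :: rest)) "+").getD []
        = pvSplitPlus (PySem.Str.join "+" (e :: rest)) from rfl]
  rw [pvSplitPlus_eq_pieces, pvPieces]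
  have hjoin : (PySem.Str.join "+" (e :: rest)).toList
      = PySem.Chars.join ['+'] (e.toList :: rest.map String.toList) := by
    simp [PySem.Str.join]
  rw [hjoin, pvMS_join]
  simp only [pvPieces, List.map_append, List.map_cons, List.flatMap_cons,
    List.map_flatMap, List.flatMap_map]
  rfl

-- ===== VERDICT (by name: the statement is the Claim_ definition above) =====
theorem split_pluses_spec : Claim_equal_split_pluses := by
  intro path _
  unfold Spec_split_pluses
  cases hp : path with
  | nil => simp [split_pluses, split_pluses_alt]
  | cons e rest =>
    rw [split_pluses_flatMap, split_pluses_alt_flatMap _ (by simp)]
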